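-- pv_equiv track=rewrite | github.com/Shiba-2-shiba/ComfyUI-Scripted-Context-Generator | assets/validate_compatibility.py | get_compatible_locs
-- ===== SOURCE A (Python) =====
-- def get_canonical_loc(loc: str, aliases: dict) -> str:
--     return aliases.get(loc, loc)
--
-- def get_compatible_locs(char_name: str, char_info: dict, compat: dict, excluded: set, aliases: dict) -> dict:
--     """キャラの互換ロケーション一覧を返す。{canonical_loc: {source_type, source_tag, original_loc}} の辞書"""
--     result = {}
--
--     # 1. 汎用loc
--     for loc in compat["universal_locs"]:
--         canon = get_canonical_loc(loc, aliases)
--         if (char_name, canon) not in excluded: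
--             if canon not in result: # 優先順位: 汎用は最も低いが、ベースとして追加
--                  result[canon] = {"type": "universal", "tag": None, "original": loc}
--
--     # 2. 世界観タグマッチ
--     char_tags = char_info.get("tags", [])
--     for tag in char_tags:
--         for loc in compat["loc_tags"].get(tag, []):
--             canon = get_canonical_loc(loc, aliases)
--             if (char_name, canon) not in excluded:
--                 # タグ由来は汎用より優先されるべきだが、ループ順序的に上書きor追加
--                 result[canon] = {"type": "tag", "tag": tag, "original": loc}
--
--     return result
-- ===== SOURCE B (Python) =====
-- def get_compatible_locs(char_name: str, char_info: dict, compat: dict, excluded: set, aliases: dict) -> dict: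
--     """No mutated accumulator: materialise the two candidate streams, derive the key order
--     as one ordered dedup of their canonical keys, and compute each key's winning entry by
--     a per-key search (last tag candidate wins, else first universal candidate)."""
--     def canon(loc):
--         return aliases.get(loc, loc)
--
--     uni = [(canon(loc), loc) for loc in compat["universal_locs"]
--            if (char_name, canon(loc)) not in excluded]
--     tag_pairs = [(canon(loc), tag, loc)
--                  for tag in char_info.get("tags", [])
--                  for loc in compat["loc_tags"].get(tag, [])
--                  if (char_name, canon(loc)) not in excluded]
--
--     order = list(dict.fromkeys([c for c, _ in uni] + [c for c, _, _ in tag_pairs]))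
--
--     def winner(c):
--         for cc, tag, loc in reversed(tag_pairs):
--             if cc == c:
--                 return {"type": "tag", "tag": tag, "original": loc}
--         for cc, loc in uni:
--             if cc == c:
--                 return {"type": "universal", "tag": None, "original": loc}
--
--     return {c: winner(c) for c in order}
-- ===== Notes on version B (the rewrite author's own statement) =====
-- stated objective: alternative
-- what changed: B never mutates an accumulator dict: it materialises the filtered universal and tag candidate streams, derives the result's key order as one ordered dedup of their canonical keys, and computes each key's entry by a per-key search (last matching tag candidate, else first matching universal candidate), whereas A builds the dict by guarded insertion and overwriting.
import Mathlib
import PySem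

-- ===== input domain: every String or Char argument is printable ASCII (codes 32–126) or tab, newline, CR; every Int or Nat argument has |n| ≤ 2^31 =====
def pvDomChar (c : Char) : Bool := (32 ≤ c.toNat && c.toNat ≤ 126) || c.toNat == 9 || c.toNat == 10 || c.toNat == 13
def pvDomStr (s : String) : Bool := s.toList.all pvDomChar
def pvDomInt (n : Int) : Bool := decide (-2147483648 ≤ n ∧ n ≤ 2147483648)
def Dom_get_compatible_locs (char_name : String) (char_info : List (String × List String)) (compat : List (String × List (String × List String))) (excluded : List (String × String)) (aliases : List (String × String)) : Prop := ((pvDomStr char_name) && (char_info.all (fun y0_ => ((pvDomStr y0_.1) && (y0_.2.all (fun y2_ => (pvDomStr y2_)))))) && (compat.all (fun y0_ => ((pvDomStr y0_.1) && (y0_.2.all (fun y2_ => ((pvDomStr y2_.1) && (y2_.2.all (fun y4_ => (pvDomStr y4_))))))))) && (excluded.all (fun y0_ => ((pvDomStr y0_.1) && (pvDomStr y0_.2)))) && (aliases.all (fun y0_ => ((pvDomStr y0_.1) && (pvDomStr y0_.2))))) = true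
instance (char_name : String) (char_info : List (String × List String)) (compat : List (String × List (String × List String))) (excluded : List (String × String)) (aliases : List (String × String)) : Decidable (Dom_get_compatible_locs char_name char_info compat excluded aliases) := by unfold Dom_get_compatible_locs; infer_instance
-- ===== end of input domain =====

-- B drops A's mutated accumulator entirely: it materialises the candidate streams, derives the key
-- order as one ordered dedup, and finds each key's entry by a per-key search (alternative algorithm).

-- ===== PORT A =====
def get_canonical_loc (loc : String) (aliases : List (String × String)) : String :=
  (PySem.Dict.mk aliases).getD loc loc

def get_compatible_locs (char_name : String) (char_info : List (String × List String)) (compat : List (String × List (String × List String))) (excluded : List (String × String)) (aliases : List (String × String)) : List (String × List (String × Option String)) :=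
  let result : PySem.Dict String (List (String × Option String)) := PySem.Dict.empty
  -- for loc in compat["universal_locs"]  (the value is a dict: iterating yields its distinct keys in order)
  let result := (PySem.Set.ofList (((PySem.Dict.mk compat).getD "universal_locs" []).map (·.1))).foldl
    (fun r loc =>
      let canon := get_canonical_loc loc aliases
      if excluded.contains (char_name, canon) then r
      else if r.contains canon then r
      else r.insert canon [("type", some "universal"), ("tag", none), ("original", some loc)]) result
  let char_tags := (PySem.Dict.mk char_info).getD "tags" []
  let result := char_tags.foldl
    (fun r tag =>
      ((PySem.Dict.mk ((PySem.Dict.mk compat).getD "loc_tags" [])).getD tag []).foldl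
        (fun r loc =>
          let canon := get_canonical_loc loc aliases
          if excluded.contains (char_name, canon) then r
          else r.insert canon [("type", some "tag"), ("tag", some tag), ("original", some loc)]) r) result
  result.items

-- ===== PORT B =====
def get_compatible_locs_alt (char_name : String) (char_info : List (String × List String)) (compat : List (String × List (String × List String))) (excluded : List (String × String)) (aliases : List (String × String)) : List (String × List (String × Option String)) :=
  let canonF := fun loc => (PySem.Dict.mk aliases).getD loc loc
  -- uni = [(canon(loc), loc) for loc in compat["universal_locs"] if not excluded]
  let uni : List (String × String) :=
    (PySem.Set.ofList (((PySem.Dict.mk compat).getD "universal_locs" []).map (·.1))).filterMap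
      (fun loc => if excluded.contains (char_name, canonF loc) then none else some (canonF loc, loc))
  -- tag_pairs = [(canon(loc), tag, loc) for tag in tags for loc in loc_tags.get(tag, []) if not excluded]
  let tag_pairs : List (String × String × String) :=
    ((PySem.Dict.mk char_info).getD "tags" []).flatMap (fun tag =>
      ((PySem.Dict.mk ((PySem.Dict.mk compat).getD "loc_tags" [])).getD tag []).filterMap
        (fun loc => if excluded.contains (char_name, canonF loc) then none else some (canonF loc, tag, loc)))
  -- order = list(dict.fromkeys(uni keys + tag keys))
  let order : List String := PySem.List.dedup (uni.map (·.1) ++ tag_pairs.map (·.1))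
  -- winner(c): last matching tag candidate, else first matching universal candidate
  -- ([] is the Python function's fall-through None: unreachable for c in order, which occurs in uni or tag_pairs)
  let winner := fun (c : String) =>
    match tag_pairs.reverse.find? (fun p => p.1 == c) with
    | some p => [("type", some "tag"), ("tag", some p.2.1), ("original", some p.2.2)]
    | none =>
      match uni.find? (fun p => p.1 == c) with
      | some p => [("type", some "universal"), ("tag", (none : Option String)), ("original", some p.2)]
      | none => []
  -- {c: winner(c) for c in order}: order is duplicate-free, so the dict's items are exactly this map
  order.map (fun c => (c, winner c))

-- ===== PRECONDITION & SPEC =====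
-- Pre_ excludes exactly the inputs where Python A raises KeyError: compat lacking "universal_locs",
-- or compat lacking "loc_tags" while the character has a non-empty tag list.
def Pre_get_compatible_locs (char_name : String) (char_info : List (String × List String)) (compat : List (String × List (String × List String))) (excluded : List (String × String)) (aliases : List (String × String)) : Prop :=
  (PySem.Dict.mk compat).contains "universal_locs" = true ∧
  ((PySem.Dict.mk char_info).getD "tags" [] ≠ [] → (PySem.Dict.mk compat).contains "loc_tags" = true)
instance (char_name : String) (char_info : List (String × List String)) (compat : List (String × List (String × List String))) (excluded : List (String × String)) (aliases : List (String × String)) : Decidable (Pre_get_compatible_locs char_name char_info compat excluded aliases) := by unfold Pre_get_compatible_locs; infer_instance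

def pvWitness_get_compatible_locs : String × (List (String × List String)) × (List (String × List (String × List String))) × (List (String × String)) × (List (String × String)) :=
  ("X", [("tags", ["t1"])], [("universal_locs", [("park", []), ("cafe", [])]), ("loc_tags", [("t1", ["cafe", "beach"])])], [("X", "beach")], [("cafe", "den")])

def Spec_get_compatible_locs (char_name : String) (char_info : List (String × List String)) (compat : List (String × List (String × List String))) (excluded : List (String × String)) (aliases : List (String × String)) (out : List (String × List (String × Option String))) : Prop := out = get_compatible_locs_alt char_name char_info compat excluded aliases
instance (char_name : String) (char_info : List (String × List String)) (compat : List (String × List (String × List String))) (excluded : List (String × String)) (aliases : List (String × String)) (out : List (String × List (String × Option String))) : Decidable (Spec_get_compatible_locs char_name char_info compat excluded aliases out) := by unfold Spec_get_compatible_locs; infer_instance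

-- ===== CLAIM (what is proved, stated in full; the proofs are below) =====
def Claim_equal_get_compatible_locs : Prop := ∀ (char_name : String) (char_info : List (String × List String)) (compat : List (String × List (String × List String))) (excluded : List (String × String)) (aliases : List (String × String)), Dom_get_compatible_locs char_name char_info compat excluded aliases → Pre_get_compatible_locs char_name char_info compat excluded aliases → Spec_get_compatible_locs char_name char_info compat excluded aliases (get_compatible_locs char_name char_info compat excluded aliases)

-- ===== LEMMAS AND PROOFS =====

-- A's guarded universal loop over the raw locations is the first-wins loop over B's filtered pair stream
theorem uni_guard {ν : Type} (c : String → Bool) (k : String → String) (e : String → ν)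
    (l : List String) (d : PySem.Dict String ν) :
    l.foldl (fun r loc => if c loc then r else if r.contains (k loc) then r
             else r.insert (k loc) (e loc)) d
      = (l.filterMap (fun loc => if c loc then none else some (k loc, loc))).foldl
          (fun r p => if r.contains p.1 then r else r.insert p.1 (e p.2)) d := by
  induction l generalizing d with
  | nil => rfl
  | cons a l ih => by_cases h : c a <;> simp [h, ih]

-- A's guarded inner tag loop over the raw locations is the overwrite loop over B's filtered triple stream
theorem ins_guard {ν : Type} (c : String → Bool) (k : String → String) (t : String)
    (e : String → String → ν) (l : List String) (d : PySem.Dict String ν) :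
    l.foldl (fun r loc => if c loc then r else r.insert (k loc) (e t loc)) d
      = (l.filterMap (fun loc => if c loc then none else some (k loc, t, loc))).foldl
          (fun r p => r.insert p.1 (e p.2.1 p.2.2)) d := by
  induction l generalizing d with
  | nil => rfl
  | cons a l ih => by_cases h : c a <;> simp [h, ih]

-- a nested loop is the loop over the flattened stream
theorem foldl_nested_flatMap {α β δ : Type} (h : α → List β) (g : δ → β → δ) (l : List α) (d : δ) :
    l.foldl (fun d a => (h a).foldl g d) d = (l.flatMap h).foldl g d := by
  induction l generalizing d with
  | nil => rfl
  | cons a l ih => simp [List.flatMap_cons, List.foldl_append, ih]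

-- keys of the first-wins (guarded-insert) loop
theorem keys_foldl_firstWins {ν : Type} (eU : String × String → ν)
    (l : List (String × String)) (d : PySem.Dict String ν) :
    (l.foldl (fun r p => if r.contains p.1 then r else r.insert p.1 (eU p)) d).keys
      = PySem.Set.update d.keys (l.map (·.1)) := by
  induction l generalizing d with
  | nil => rfl
  | cons p l ih =>
    rw [List.map_cons, PySem.Set.update_cons, List.foldl_cons, ih]
    congr 1
    by_cases h : d.contains p.1 = true
    · rw [if_pos h]
      exact (PySem.Set.add_of_mem ((PySem.Dict.contains_iff_mem_keys d p.1).mp h)).symm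
    · have hb : d.contains p.1 = false := by simpa using h
      rw [if_neg h, PySem.Dict.keys_insert_of_not_contains d _ hb]
      exact (PySem.Set.add_of_not_mem
        (fun hm => h ((PySem.Dict.contains_iff_mem_keys d p.1).mpr hm))).symm

-- lookup in the first-wins loop: the first matching candidate wins
theorem getD_foldl_firstWins {ν : Type} (eU : String × String → ν)
    (l : List (String × String)) (d : PySem.Dict String ν) (c : String) (dflt : ν) :
    (l.foldl (fun r p => if r.contains p.1 then r else r.insert p.1 (eU p)) d).getD c dflt
      = if d.contains c = true then d.getD c dflt
        else match l.find? (fun p => p.1 == c) with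
             | some p => eU p
             | none => dflt := by
  induction l generalizing d with
  | nil =>
    simp only [List.foldl_nil, List.find?_nil]
    by_cases h : d.contains c = true
    · rw [if_pos h]
    · rw [if_neg h, PySem.Dict.getD_of_not_contains d dflt (by simpa using h)]
  | cons p l ih =>
    rw [List.foldl_cons, ih]
    by_cases hpc : p.1 = c
    · subst hpc
      by_cases hc : d.contains p.1 = true
      · simp [hc]
      · have hcf : d.contains p.1 = false := by simpa using hc
        simp [hcf, PySem.Dict.getD_insert_self]
    · have hne : c ≠ p.1 := Ne.symm hpc
      have hbc : (p.1 == c) = false := by simp [hpc]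
      by_cases hp : d.contains p.1 = true
      · simp [hp, hbc]
      · have hpf : d.contains p.1 = false := by simpa using hp
        simp [hpf, PySem.Dict.contains_insert, hbc, hne,
              PySem.Dict.getD_insert_of_ne d (eU p) dflt hne]

-- lookup after the overwrite loop: the last matching candidate wins, else the base dict
theorem getD_foldl_insert_last {ν : Type} (eT : String × String × String → ν)
    (l : List (String × String × String)) (d : PySem.Dict String ν) (c : String) (dflt : ν) :
    (l.foldl (fun r p => r.insert p.1 (eT p)) d).getD c dflt
      = match l.reverse.find? (fun p => p.1 == c) with
        | some p => eT p
        | none => d.getD c dflt := by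
  induction l generalizing d with
  | nil => rfl
  | cons p l ih =>
    rw [List.foldl_cons, ih, List.reverse_cons, List.find?_append]
    cases hf : l.reverse.find? (fun p => p.1 == c) with
    | some q => simp
    | none =>
      simp only [Option.none_or]
      by_cases hpc : (p.1 == c) = true
      · have hpc' : p.1 = c := by simpa using hpc
        rw [← hpc']
        simp [List.find?, PySem.Dict.getD_insert_self]
      · have hne : c ≠ p.1 := fun h => hpc (by simp [h])
        simp [List.find?, hpc, PySem.Dict.getD_insert_of_ne d (eT p) dflt hne]

theorem nodup_keys_firstWins {ν : Type} (eU : String × String → ν) (l : List (String × String)) :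
    (l.foldl (fun r p => if r.contains p.1 then r else r.insert p.1 (eU p))
      (PySem.Dict.empty : PySem.Dict String ν)).keys.Nodup := by
  rw [keys_foldl_firstWins, PySem.Dict.keys_empty, PySem.Set.update_nil_left]
  exact PySem.Set.nodup_ofList _

-- the core identity, stated over B's two candidate streams
theorem ports_core (uni : List (String × String)) (tag_pairs : List (String × String × String)) :
    (tag_pairs.foldl
        (fun r p => r.insert p.1 [("type", some "tag"), ("tag", some p.2.1), ("original", some p.2.2)])
        (uni.foldl
          (fun r p => if r.contains p.1 then r
                      else r.insert p.1 [("type", some "universal"), ("tag", (none : Option String)), ("original", some p.2)])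
          PySem.Dict.empty)).items
    = (PySem.List.dedup (uni.map (·.1) ++ tag_pairs.map (·.1))).map (fun c => (c,
        match tag_pairs.reverse.find? (fun p => p.1 == c) with
        | some p => [("type", some "tag"), ("tag", some p.2.1), ("original", some p.2.2)]
        | none =>
          match uni.find? (fun p => p.1 == c) with
          | some p => [("type", some "universal"), ("tag", (none : Option String)), ("original", some p.2)]
          | none => [])) := by
  have hnd1 := nodup_keys_firstWins
    (fun p : String × String => [("type", some "universal"), ("tag", (none : Option String)), ("original", some p.2)]) uni
  have hnd : (tag_pairs.foldl
      (fun r p => r.insert p.1 [("type", some "tag"), ("tag", some p.2.1), ("original", some p.2.2)])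
      (uni.foldl
        (fun r p => if r.contains p.1 then r
                    else r.insert p.1 [("type", some "universal"), ("tag", (none : Option String)), ("original", some p.2)])
        PySem.Dict.empty)).keys.Nodup :=
    PySem.Dict.nodup_keys_foldl_insert_key tag_pairs (fun p => p.1)
      (fun _ p => [("type", some "tag"), ("tag", some p.2.1), ("original", some p.2.2)]) _ hnd1
  rw [PySem.Dict.items_eq_map_keys _ hnd [],
      PySem.Dict.keys_foldl_insert_key tag_pairs (fun p => p.1)
        (fun _ p => [("type", some "tag"), ("tag", some p.2.1), ("original", some p.2.2)]),
      keys_foldl_firstWins, PySem.Dict.keys_empty, PySem.Set.update_nil_left,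
      ← PySem.Set.ofList_append, ← PySem.List.dedup_eq_ofList]
  apply List.map_congr_left
  intro c _
  rw [getD_foldl_insert_last, getD_foldl_firstWins,
      if_neg (by simp [PySem.Dict.contains_empty])]

-- ===== VERDICT (by name: the statement is the Claim_ definition above) =====
theorem get_compatible_locs_spec : Claim_equal_get_compatible_locs := by
  intro char_name char_info compat excluded aliases _ _
  unfold Spec_get_compatible_locs get_compatible_locs get_compatible_locs_alt get_canonical_loc
  simp only []
  rw [show ((PySem.Set.ofList (((PySem.Dict.mk compat).getD "universal_locs" []).map (·.1))).foldl
        (fun (r : PySem.Dict String (List (String × Option String))) loc =>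
          if excluded.contains (char_name, (PySem.Dict.mk aliases).getD loc loc) then r
          else if r.contains ((PySem.Dict.mk aliases).getD loc loc) then r
          else r.insert ((PySem.Dict.mk aliases).getD loc loc)
            [("type", some "universal"), ("tag", none), ("original", some loc)]) PySem.Dict.empty)
      = (((PySem.Set.ofList (((PySem.Dict.mk compat).getD "universal_locs" []).map (·.1))).filterMap
          (fun loc => if excluded.contains (char_name, (PySem.Dict.mk aliases).getD loc loc) then none
            else some ((PySem.Dict.mk aliases).getD loc loc, loc))).foldl
          (fun (r : PySem.Dict String (List (String × Option String))) p =>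
            if r.contains p.1 then r
            else r.insert p.1 [("type", some "universal"), ("tag", none), ("original", some p.2)])
          PySem.Dict.empty)
    from uni_guard
      (fun loc => excluded.contains (char_name, (PySem.Dict.mk aliases).getD loc loc))
      (fun loc => (PySem.Dict.mk aliases).getD loc loc)
      (fun loc => [("type", some "universal"), ("tag", none), ("original", some loc)]) _ _]
  rw [show (fun (r : PySem.Dict String (List (String × Option String))) tag =>
        ((PySem.Dict.mk ((PySem.Dict.mk compat).getD "loc_tags" [])).getD tag []).foldl
          (fun r loc =>
            if excluded.contains (char_name, (PySem.Dict.mk aliases).getD loc loc) then r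
            else r.insert ((PySem.Dict.mk aliases).getD loc loc)
              [("type", some "tag"), ("tag", some tag), ("original", some loc)]) r)
    = (fun (r : PySem.Dict String (List (String × Option String))) tag =>
        (((PySem.Dict.mk ((PySem.Dict.mk compat).getD "loc_tags" [])).getD tag []).filterMap
          (fun loc => if excluded.contains (char_name, (PySem.Dict.mk aliases).getD loc loc) then none
            else some ((PySem.Dict.mk aliases).getD loc loc, tag, loc))).foldl
          (fun r p => r.insert p.1 [("type", some "tag"), ("tag", some p.2.1), ("original", some p.2.2)]) r)
    from funext fun r => funext fun tag =>
      ins_guard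
        (fun loc => excluded.contains (char_name, (PySem.Dict.mk aliases).getD loc loc))
        (fun loc => (PySem.Dict.mk aliases).getD loc loc) tag
        (fun tag loc => [("type", some "tag"), ("tag", some tag), ("original", some loc)]) _ r]
  rw [foldl_nested_flatMap]
  exact ports_core _ _
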